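-- pv_equiv track=rewrite | github.com/afskylia/2048 | src/main.py | monotony_score
-- ===== SOURCE A (Python) =====
-- def monotony_score(row):
--     penalty = 0
--     # bonus = 0  # Increases when there are more of the same number next to each other, e.g. [2,2,16,2]=4
--
--     for x in range(len(row)):
--         next_x = x
--         while next_x < len(row) - 1:
--             next_x += 1
--             if row[next_x] != 0:
--                 # if row[next_x] == row[x]:
--                 #     bonus += row[x] ** 2
--                 penalty += abs(row[x] - row[next_x]) ** 2
--                 break
--     return penalty
-- ===== SOURCE B (Python) =====
-- def monotony_score(row):
--     # Single right-to-left pass: next_nz holds the nearest nonzero value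
--     # strictly to the right of the current position.
--     penalty = 0
--     next_nz = None
--     for x in range(len(row) - 1, -1, -1):
--         if next_nz is not None:
--             penalty += abs(row[x] - next_nz) ** 2
--         if row[x] != 0:
--             next_nz = row[x]
--     return penalty
-- ===== Notes on version B (the rewrite author's own statement) =====
-- stated objective: alternative
-- what changed: Replaces the per-position forward rescan for the next nonzero element with one right-to-left pass that carries the nearest nonzero value seen so far (O(n) worst case vs A's O(n^2) worst case on zero-heavy rows; not measurably faster on dense rows).
import Mathlib
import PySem

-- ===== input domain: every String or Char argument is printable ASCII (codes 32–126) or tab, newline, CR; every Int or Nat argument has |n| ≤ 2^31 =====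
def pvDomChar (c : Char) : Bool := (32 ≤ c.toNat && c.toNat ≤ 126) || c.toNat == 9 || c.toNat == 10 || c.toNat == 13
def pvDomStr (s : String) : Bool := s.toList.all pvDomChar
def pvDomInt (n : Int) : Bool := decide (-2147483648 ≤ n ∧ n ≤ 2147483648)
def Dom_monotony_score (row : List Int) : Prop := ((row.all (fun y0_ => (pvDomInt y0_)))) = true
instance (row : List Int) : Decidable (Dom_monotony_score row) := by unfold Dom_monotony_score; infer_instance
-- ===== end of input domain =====

-- B replaces A's per-position forward rescan with one right-to-left pass carrying the
-- nearest nonzero value seen so far (objective: alternative single-pass algorithm).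

-- ===== PORT A =====
-- inner 'while next_x < len(row) - 1' loop of A; row[next_x] is always in range here,
-- so pyGetD is exact
def monoInner (row : List Int) (rx : Int) (next_x : Int) (penalty : Int) : Int :=
  if h : next_x < (row.length : Int) - 1 then
    if PySem.List.pyGetD row (next_x + 1) 0 ≠ 0 then
      penalty + |rx - PySem.List.pyGetD row (next_x + 1) 0| ^ 2
    else monoInner row rx (next_x + 1) penalty
  else penalty
termination_by ((row.length : Int) - 1 - next_x).toNat
decreasing_by omega

def monotony_score (row : List Int) : Int :=
  (PySem.List.pyRange 0 row.length 1).foldl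
    (fun penalty x => monoInner row (PySem.List.pyGetD row x 0) x penalty) 0

-- ===== PORT B =====
-- right-to-left loop of Source B as structural recursion over the list:
-- returns (penalty so far, next_nz) after processing the suffix
def altGo : List Int → Int × Option Int
  | [] => (0, none)
  | a :: rest =>
    let s := altGo rest
    let p := match s.2 with
      | some v => s.1 + |a - v| ^ 2
      | none => s.1
    (p, if a ≠ 0 then some a else s.2)

def monotony_score_alt (row : List Int) : Int :=
  (altGo row).1

-- ===== PRECONDITION & SPEC =====
def Spec_monotony_score (row : List Int) (out : Int) : Prop := out = monotony_score_alt row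
instance (row : List Int) (out : Int) : Decidable (Spec_monotony_score row out) := by unfold Spec_monotony_score; infer_instance

-- ===== CLAIM (what is proved, stated in full; the proofs are below) =====
def Claim_equal_monotony_score : Prop := ∀ (row : List Int), Dom_monotony_score row → Spec_monotony_score row (monotony_score row)

-- ===== LEMMAS AND PROOFS =====

-- first nonzero element of a list
def firstNz : List Int → Option Int
  | [] => none
  | a :: r => if a ≠ 0 then some a else firstNz r

-- squared distance to the next nonzero element (if any)
def sqTo (rx : Int) : Option Int → Int
  | none => 0
  | some v => |rx - v| ^ 2

-- reference score both ports are reduced to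
def specScore : List Int → Int
  | [] => 0
  | a :: r => sqTo a (firstNz r) + specScore r

theorem altGo_eq (l : List Int) : altGo l = (specScore l, firstNz l) := by
  induction l with
  | nil => rfl
  | cons a r ih =>
    simp only [altGo, ih, specScore, firstNz]
    cases h : firstNz r with
    | none => simp [sqTo]
    | some v => simp [sqTo]; ring

theorem inner_eq (row : List Int) (rx pen : Int) :
    ∀ (k i : ℕ), row.length - 1 - i = k →
      monoInner row rx (i : Int) pen = pen + sqTo rx (firstNz (row.drop (i + 1))) := by
  intro k
  induction k with
  | zero =>
    intro i hk
    rw [monoInner, dif_neg (by omega)]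
    rw [List.drop_eq_nil_of_le (by omega)]
    simp [firstNz, sqTo]
  | succ k ih =>
    intro i hk
    have hi : i + 1 < row.length := by omega
    rw [monoInner, dif_pos (by omega)]
    have hcast : (i : Int) + 1 = ((i + 1 : ℕ) : Int) := by push_cast; ring
    rw [hcast, PySem.List.pyGetD_natCast]
    rw [List.getD_eq_getElem _ _ hi]
    rw [List.drop_eq_getElem_cons hi]
    simp only [firstNz]
    by_cases hv : row[i + 1] ≠ 0
    · rw [if_pos hv, if_pos hv]; rfl
    · rw [if_neg hv, if_neg hv]
      exact ih (i + 1) (by omega)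

theorem outer_eq (row : List Int) :
    ∀ (k a : ℕ) (pen : Int), row.length - a = k → a ≤ row.length →
      (PySem.List.pyRange (a : Int) row.length 1).foldl
        (fun penalty x => monoInner row (PySem.List.pyGetD row x 0) x penalty) pen
      = pen + specScore (row.drop a) := by
  intro k
  induction k with
  | zero =>
    intro a pen hk ha
    rw [PySem.List.pyRange_one_eq_nil (by omega)]
    rw [List.drop_eq_nil_of_le (by omega)]
    simp [specScore]
  | succ k ih =>
    intro a pen hk ha
    have hlt : a < row.length := by omega
    rw [PySem.List.pyRange_one_cons (by omega)]
    simp only [List.foldl_cons]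
    rw [PySem.List.pyGetD_natCast, List.getD_eq_getElem _ _ hlt]
    rw [inner_eq row _ pen (row.length - 1 - a) a rfl]
    have hcast : (a : Int) + 1 = ((a + 1 : ℕ) : Int) := by omega
    rw [hcast, ih (a + 1) _ (by omega) (by omega)]
    rw [List.drop_eq_getElem_cons hlt]
    simp only [specScore]
    ring

-- ===== VERDICT (by name: the statement is the Claim_ definition above) =====
theorem monotony_score_spec : Claim_equal_monotony_score := by
  intro row _
  unfold Spec_monotony_score monotony_score monotony_score_alt
  rw [altGo_eq]
  have h := outer_eq row row.length 0 0 (by omega) (by omega)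
  simpa using h
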